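-- pv_equiv track=rewrite | github.com/delosyCho/Multi-Paragraph-Machine-Reading-Comprehension-with-Hybrid-Reader | utils/HTML_Processor.py | answer_re_touch
-- ===== SOURCE A (Python) =====
-- tag_list = ['<table', '</table>', '<th', '</th>', '<td', '</td>', '<ul', '</ul>', '<li>', '</li>', '<h2>', '</h2>',
--             '<h3>', '</h3>']
--
-- tag2replace = ['[table]<table', '[/table]', '[th]<th', '[/th]', '[td]<td', '[/td]', '[list]<ul', '[/list]',
--                '[li]', '[/li]', '[h2]', '[/h2]', '[h3]', '[/h3]']
--
-- def answer_re_touch(document):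
--     tags = ['[list]', '[/list]', '[li]', '[/li]']
--     tags2 = ['<list>', '</list>', '<li>', '</li>']
--
--     for i in range(len(tag_list)):
--         document = document.replace(tag2replace[i], tag_list[i])
--     for i in range(len(tags)):
--         document = document.replace(tags[i], tags2[i])
--
--     return document
-- ===== SOURCE B (Python) =====
-- tag_list = ['<table', '</table>', '<th', '</th>', '<td', '</td>', '<ul', '</ul>', '<li>', '</li>', '<h2>', '</h2>',
--             '<h3>', '</h3>']
--
-- tag2replace = ['[table]<table', '[/table]', '[th]<th', '[/th]', '[td]<td', '[/td]', '[list]<ul', '[/list]',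
--                '[li]', '[/li]', '[h2]', '[/h2]', '[h3]', '[/h3]']
--
-- # One ordered replacement table: loop1's pairs first, then loop2's, so first-match
-- # precedence reproduces the pass order ('[list]<ul' before '[list]', '[/list]'->'</ul>').
-- _PAIRS = list(zip(tag2replace, tag_list)) + \
--     list(zip(['[list]', '[/list]', '[li]', '[/li]'],
--              ['<list>', '</list>', '<li>', '</li>']))
--
--
-- def answer_re_touch(document):
--     out = []
--     i, n = 0, len(document)
--     while i < n:
--         for pat, rep in _PAIRS:
--             if document.startswith(pat, i):
--                 out.append(rep)
--                 i += len(pat)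
--                 break
--         else:
--             out.append(document[i])
--             i += 1
--     return ''.join(out)
-- ===== Notes on version B (the rewrite author's own statement) =====
-- stated objective: alternative
-- what changed: A makes 18 sequential full-string replace passes; B builds one ordered (pattern, replacement) table (loop1's pairs before loop2's, so first-match precedence reproduces the pass order) and does a single left-to-right scan emitting the first matching pattern's replacement at each position.
import Mathlib
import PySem

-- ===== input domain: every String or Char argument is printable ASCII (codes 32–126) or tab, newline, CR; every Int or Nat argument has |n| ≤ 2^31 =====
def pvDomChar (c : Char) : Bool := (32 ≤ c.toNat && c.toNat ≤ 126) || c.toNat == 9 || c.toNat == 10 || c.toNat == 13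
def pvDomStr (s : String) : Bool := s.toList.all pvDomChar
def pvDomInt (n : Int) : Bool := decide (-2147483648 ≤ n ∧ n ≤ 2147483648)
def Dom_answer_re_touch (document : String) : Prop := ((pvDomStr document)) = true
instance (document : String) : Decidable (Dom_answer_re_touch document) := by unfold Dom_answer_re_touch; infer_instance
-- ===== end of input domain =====

-- B replaces A's 18 sequential full-string replace passes by ONE left-to-right scan with an
-- ordered (pattern, replacement) table, first match wins (objective: alternative algorithm).

-- ===== PORT A =====
def tag_list : List String :=
  ["<table", "</table>", "<th", "</th>", "<td", "</td>", "<ul", "</ul>", "<li>", "</li>",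
   "<h2>", "</h2>", "<h3>", "</h3>"]

def tag2replace : List String :=
  ["[table]<table", "[/table]", "[th]<th", "[/th]", "[td]<td", "[/td]", "[list]<ul", "[/list]",
   "[li]", "[/li]", "[h2]", "[/h2]", "[h3]", "[/h3]"]

def answer_re_touch (document : String) : String :=
  let tags : List String := ["[list]", "[/list]", "[li]", "[/li]"]
  let tags2 : List String := ["<list>", "</list>", "<li>", "</li>"]
  let doc1 := (PySem.List.pyRange 0 (tag_list.length : Int) 1).foldl
    (fun d i =>
      PySem.Str.replace d ((PySem.List.pyGet? tag2replace i).getD "")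
        ((PySem.List.pyGet? tag_list i).getD "")) document
  let doc2 := (PySem.List.pyRange 0 (tags.length : Int) 1).foldl
    (fun d i =>
      PySem.Str.replace d ((PySem.List.pyGet? tags i).getD "")
        ((PySem.List.pyGet? tags2 i).getD "")) doc1
  doc2

-- ===== PORT B =====
-- Source B's _PAIRS: loop1's pairs first, then loop2's
def pvPairs : List (List Char × List Char) :=
  ((tag2replace.zip tag_list) ++
    ((["[list]", "[/list]", "[li]", "[/li]"] : List String).zip
      ["<list>", "</list>", "<li>", "</li>"])).map
    (fun pr => (pr.1.toList, pr.2.toList))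

-- Source B's while-loop: at each position the first table pattern that is a prefix is emitted as
-- its replacement, otherwise the character is copied; fuel = remaining length makes it total
def pvScanGo (tbl : List (List Char × List Char)) : Nat → List Char → List Char
  | 0, l => l
  | _ + 1, [] => []
  | fuel + 1, c :: t =>
    match tbl.find? (fun pr => pr.1.isPrefixOf (c :: t)) with
    | some (p, r) => r ++ pvScanGo tbl fuel (List.drop p.length (c :: t))
    | none => c :: pvScanGo tbl fuel t

def answer_re_touch_alt (document : String) : String :=
  String.ofList (pvScanGo pvPairs document.toList.length document.toList)

-- ===== PRECONDITION & SPEC =====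
def Spec_answer_re_touch (document : String) (out : String) : Prop := out = answer_re_touch_alt document
instance (document : String) (out : String) : Decidable (Spec_answer_re_touch document out) := by unfold Spec_answer_re_touch; infer_instance

-- ===== CLAIM (what is proved, stated in full; the proofs are below) =====
def Claim_equal_answer_re_touch : Prop := ∀ (document : String), Dom_answer_re_touch document → Spec_answer_re_touch document (answer_re_touch document)

-- ===== LEMMAS AND PROOFS =====

-- proof-side view of the scanner: fuel fixed to the remaining length
def pvScan (tbl : List (List Char × List Char)) (l : List Char) : List Char :=
  pvScanGo tbl l.length l

-- shapes of the table entries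
def pvBrFree (cs : List Char) : Bool := cs.all (fun c => c ≠ '[')
def pvPat (p : List Char) : Bool := (p.head? == some '[') && pvBrFree p.tail
-- w and r disagree within their common length (so w can never match across a seam built from r)
def pvDisj (w r : List Char) : Bool := !(w.isPrefixOf r) && !(r.isPrefixOf w)
def pvGoodP (q' r : List Char) : Bool := q'.tails.all (fun w => w.isEmpty || pvDisj w r)
-- the whole well-formedness of an ordered replacement table: patterns are '['-headed with
-- bracket-free tails, replacements are bracket-free, and no later pattern's proper suffix
-- can agree with an earlier replacement
def pvTblOK : List (List Char × List Char) → Bool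
  | [] => true
  | (p, r) :: T => pvPat p && pvBrFree r && T.all (fun q => pvGoodP q.1.tail r) && pvTblOK T

def pvNE (tbl : List (List Char × List Char)) : Prop := ∀ pr ∈ tbl, pr.1 ≠ ([] : List Char)

theorem pvPat_ne {p : List Char} (h : pvPat p = true) : p ≠ [] := by
  cases p with
  | nil => simp [pvPat] at h
  | cons c t => simp

theorem pvPat_shape {p : List Char} (h : pvPat p = true) :
    ∃ p', p = '[' :: p' ∧ pvBrFree p' = true := by
  cases p with
  | nil => simp [pvPat] at h
  | cons c t =>
    simp only [pvPat, List.head?_cons, List.tail_cons, Bool.and_eq_true, beq_iff_eq,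
      Option.some.injEq] at h
    exact ⟨t, by rw [h.1], h.2⟩

theorem pvGoodP_disj {q' r : List Char} (h : pvGoodP q' r = true) (hne : q' ≠ []) :
    ¬ q' <+: r ∧ ¬ r <+: q' := by
  simp only [pvGoodP, List.all_eq_true] at h
  have hmem : q' ∈ q'.tails := by simp [List.mem_tails]
  have h2 := h q' hmem
  simp only [Bool.or_eq_true, List.isEmpty_iff, pvDisj, Bool.and_eq_true,
    Bool.not_eq_true'] at h2
  rcases h2 with h2 | h2
  · exact absurd h2 hne
  · have e1 := h2.1
    have e2 := h2.2
    constructor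
    · intro hc
      rw [← List.isPrefixOf_iff_prefix] at hc
      rw [hc] at e1
      simp at e1
    · intro hc
      rw [← List.isPrefixOf_iff_prefix] at hc
      rw [hc] at e2
      simp at e2

theorem pvTblOK_pat {T : List (List Char × List Char)} (h : pvTblOK T = true) :
    ∀ q ∈ T, pvPat q.1 = true := by
  induction T with
  | nil => simp
  | cons hd tl ih =>
    obtain ⟨p, r⟩ := hd
    simp only [pvTblOK, Bool.and_eq_true] at h
    intro q hq
    rcases List.mem_cons.mp hq with hq | hq
    · subst hq; exact h.1.1.1
    · exact ih h.2 q hq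

theorem pvTblOK_ne {T : List (List Char × List Char)} (h : pvTblOK T = true) : pvNE T :=
  fun pr hpr => pvPat_ne (pvTblOK_pat h pr hpr)

theorem pvScanGo_nil (tbl : List (List Char × List Char)) (f : Nat) :
    pvScanGo tbl f [] = [] := by cases f <;> rfl

theorem pvScanGo_elastic (tbl : List (List Char × List Char)) (hne : pvNE tbl) :
    ∀ f1 f2 l, l.length ≤ f1 → l.length ≤ f2 →
      pvScanGo tbl f1 l = pvScanGo tbl f2 l := by
  intro f1
  induction f1 with
  | zero =>
    intro f2 l h1 _
    have : l = [] := List.eq_nil_of_length_eq_zero (Nat.le_zero.mp h1)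
    subst this; simp [pvScanGo_nil]
  | succ f ih =>
    intro f2 l h1 h2
    cases l with
    | nil => simp [pvScanGo_nil]
    | cons c t =>
      cases f2 with
      | zero => simp at h2
      | succ f2' =>
        simp only [pvScanGo]
        cases hfind : tbl.find? (fun pr => pr.1.isPrefixOf (c :: t)) with
        | none =>
          have ht1 : t.length ≤ f := by simpa using h1
          have ht2 : t.length ≤ f2' := by simpa using h2
          rw [ih f2' t ht1 ht2]
        | some pr =>
          obtain ⟨p, r⟩ := pr
          have hmem : (p, r) ∈ tbl := List.mem_of_find?_eq_some hfind
          have hp : p ≠ [] := hne _ hmem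
          have hlen : (List.drop p.length (c :: t)).length ≤ t.length := by
            have : 1 ≤ p.length := by
              cases p with | nil => exact absurd rfl hp | cons _ _ => simp
            simp only [List.length_drop, List.length_cons]
            omega
          dsimp only
          rw [ih f2' _ (le_trans hlen (by simpa using h1)) (le_trans hlen (by simpa using h2))]

theorem pvScan_cons (tbl : List (List Char × List Char)) (hne : pvNE tbl) (c : Char) (t : List Char) :
    pvScan tbl (c :: t) =
      match tbl.find? (fun pr => pr.1.isPrefixOf (c :: t)) with
      | some (p, r) => r ++ pvScan tbl (List.drop p.length (c :: t))
      | none => c :: pvScan tbl t := by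
  show pvScanGo tbl (t.length + 1) (c :: t) = _
  simp only [pvScanGo]
  cases hfind : tbl.find? (fun pr => pr.1.isPrefixOf (c :: t)) with
  | none => rw [pvScanGo_elastic tbl hne t.length t.length t (le_refl _) (le_refl _)]; rfl
  | some pr =>
    obtain ⟨p, r⟩ := pr
    have hp : p ≠ [] := hne _ (List.mem_of_find?_eq_some hfind)
    have hlen : (List.drop p.length (c :: t)).length ≤ t.length := by
      have : 1 ≤ p.length := by
        cases p with | nil => exact absurd rfl hp | cons _ _ => simp
      simp only [List.length_drop, List.length_cons]
      omega
    dsimp only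
    rw [pvScanGo_elastic tbl hne t.length _ _ hlen (le_refl _)]
    rfl

-- A's str.replace-pass equals the single-pattern scan
theorem pvGo_eq (old new : List Char) :
    ∀ fuel l acc, PySem.Chars.replace.go old new fuel l acc =
      acc.reverse ++ pvScanGo [(old, new)] fuel l := by
  intro fuel
  induction fuel with
  | zero => intro l acc; rw [PySem.Chars.replace.go.eq_def]; rfl
  | succ f ih =>
    intro l acc
    cases l with
    | nil => rw [PySem.Chars.replace.go.eq_def]; simp [pvScanGo]
    | cons c t =>
      rw [PySem.Chars.replace.go.eq_def]
      simp only [pvScanGo, List.find?]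
      by_cases hpre : old.isPrefixOf (c :: t)
      · simp only [hpre, if_true, ih]
        simp [List.reverse_append, List.append_assoc]
      · simp only [hpre, if_false, ih]
        simp

theorem pvReplace_eq_scan (l old new : List Char) (h : old ≠ []) :
    PySem.Chars.replace l old new = pvScan [(old, new)] l := by
  rw [PySem.Chars.replace]
  simp only [List.isEmpty_iff, h, if_false]
  rw [pvGo_eq]
  rfl

theorem pvFind?_congr {α : Type} (l : List α) (f g : α → Bool) (h : ∀ a ∈ l, f a = g a) :
    l.find? f = l.find? g := by
  induction l with
  | nil => rfl
  | cons a t ih =>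
    simp only [List.find?]
    rw [h a (by simp)]
    cases hg : g a with
    | true => rfl
    | false => exact ih (fun x hx => h x (by simp [hx]))

theorem pvBrFree_tail {c : Char} {t : List Char} (h : pvBrFree (c :: t) = true) :
    pvBrFree t = true := by
  simp only [pvBrFree, List.all_cons, Bool.and_eq_true] at h ⊢
  exact h.2

theorem pvGoodP_tail {c : Char} {t r : List Char} (h : pvGoodP (c :: t) r = true) :
    pvGoodP t r = true := by
  simp only [pvGoodP, List.tails, List.all_cons, Bool.and_eq_true] at h ⊢
  exact h.2

-- the key invariance: a bracket-free pattern tail q' that disagrees with r matches the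
-- single-pass output exactly where it matches the input, and drops commute with the scan
theorem pvM (p r : List Char) (hp : pvPat p = true) :
    ∀ n z q', z.length ≤ n → pvBrFree q' = true → pvGoodP q' r = true →
      (q'.isPrefixOf (pvScan [(p, r)] z) = q'.isPrefixOf z) ∧
      (q' <+: z → List.drop q'.length (pvScan [(p, r)] z) =
        pvScan [(p, r)] (List.drop q'.length z)) := by
  have hne : pvNE [(p, r)] := by
    intro pr hpr
    simp only [List.mem_singleton] at hpr
    subst hpr
    exact pvPat_ne hp
  intro n
  induction n with
  | zero =>
    intro z q' hz _ _
    have : z = [] := List.eq_nil_of_length_eq_zero (Nat.le_zero.mp hz)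
    subst this
    refine ⟨rfl, fun hq => ?_⟩
    have : q' = [] := List.prefix_nil.mp hq
    subst this
    rfl
  | succ m ih =>
    intro z q' hz hbr hgood
    cases z with
    | nil =>
      refine ⟨rfl, fun hq => ?_⟩
      have : q' = [] := List.prefix_nil.mp hq
      subst this
      rfl
    | cons c t =>
      have ht : t.length ≤ m := by simpa using hz
      by_cases hpre : p.isPrefixOf (c :: t) = true
      · -- the pattern fires here: output r, and q' can match neither side
        have hscan : pvScan [(p, r)] (c :: t) =
            r ++ pvScan [(p, r)] (List.drop p.length (c :: t)) := by
          rw [pvScan_cons _ hne]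
          simp [List.find?, hpre]
        obtain ⟨p', hp', _⟩ := pvPat_shape hp
        have hc : c = '[' := by
          rw [hp'] at hpre
          rcases List.cons_prefix_cons.mp (List.isPrefixOf_iff_prefix.mp hpre) with ⟨h1, _⟩
          exact h1.symm
        constructor
        · cases q' with
          | nil => simp
          | cons d q'' =>
            have hd : d ≠ '[' := by
              simp only [pvBrFree, List.all_cons, Bool.and_eq_true, decide_eq_true_eq] at hbr
              exact hbr.1
            have hdisj := pvGoodP_disj hgood (by simp)
            have hL : (d :: q'').isPrefixOf (r ++ pvScan [(p, r)] (List.drop p.length (c :: t))) = false := by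
              by_contra hcon
              have hpref := List.isPrefixOf_iff_prefix.mp (Bool.not_eq_false _ ▸ hcon)
              rcases List.prefix_or_prefix_of_prefix hpref (List.prefix_append r _) with h1 | h1
              · exact hdisj.1 h1
              · exact hdisj.2 h1
            have hR : (d :: q'').isPrefixOf (c :: t) = false := by
              have : (d == c) = false := by
                simp only [beq_eq_false_iff_ne, ne_eq, hc]
                exact hd
              simp [List.isPrefixOf, this]
            rw [hscan, hL, hR]
        · intro hq
          cases q' with
          | nil => simp
          | cons d q'' =>
            exfalso
            have hd : d ≠ '[' := by
              simp only [pvBrFree, List.all_cons, Bool.and_eq_true, decide_eq_true_eq] at hbr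
              exact hbr.1
            exact hd ((List.cons_prefix_cons.mp hq).1.trans hc)
      · -- no match at this position: one character is copied
        have hscan : pvScan [(p, r)] (c :: t) = c :: pvScan [(p, r)] t := by
          rw [pvScan_cons _ hne]
          simp [List.find?, hpre]
        constructor
        · cases q' with
          | nil => simp
          | cons d q'' =>
            rw [hscan]
            simp only [List.isPrefixOf]
            rw [(ih t q'' ht (pvBrFree_tail hbr) (pvGoodP_tail hgood)).1]
        · intro hq
          cases q' with
          | nil => simp
          | cons d q'' =>
            rcases List.cons_prefix_cons.mp hq with ⟨_, hq''⟩
            rw [hscan]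
            simp only [List.length_cons, List.drop_succ_cons]
            exact (ih t q'' ht (pvBrFree_tail hbr) (pvGoodP_tail hgood)).2 hq''

-- a bracket-free chunk passes through the scan unchanged
theorem pvScan_brFree_append (tbl : List (List Char × List Char))
    (hpat : ∀ q ∈ tbl, pvPat q.1 = true) :
    ∀ u X, pvBrFree u = true → pvScan tbl (u ++ X) = u ++ pvScan tbl X := by
  have hne : pvNE tbl := fun pr hpr => pvPat_ne (hpat pr hpr)
  intro u
  induction u with
  | nil => intro X _; simp
  | cons c u' ih =>
    intro X hbr
    have hc : c ≠ '[' := by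
      simp only [pvBrFree, List.all_cons, Bool.and_eq_true, decide_eq_true_eq] at hbr
      exact hbr.1
    have hfind : tbl.find? (fun pr => pr.1.isPrefixOf (c :: (u' ++ X))) = none := by
      apply List.find?_eq_none.mpr
      intro q hq
      obtain ⟨q', hq', _⟩ := pvPat_shape (hpat q hq)
      rw [hq']
      have : (('[' : Char) == c) = false := by
        simp only [beq_eq_false_iff_ne, ne_eq]
        exact fun h => hc h.symm
      simp [List.isPrefixOf, this]
    rw [List.cons_append, pvScan_cons tbl hne, hfind]
    dsimp only
    rw [ih X (pvBrFree_tail hbr)]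
    rfl

-- fusing one replace pass into the head of the table
theorem pvFusion (p r : List Char) (T' : List (List Char × List Char))
    (hok : pvTblOK ((p, r) :: T') = true) :
    ∀ n s, s.length ≤ n → pvScan T' (pvScan [(p, r)] s) = pvScan ((p, r) :: T') s := by
  have hparts : pvPat p = true ∧ pvBrFree r = true ∧
      (∀ q ∈ T', pvGoodP q.1.tail r = true) ∧ pvTblOK T' = true := by
    simp only [pvTblOK, Bool.and_eq_true, List.all_eq_true] at hok
    exact ⟨hok.1.1.1, hok.1.1.2, hok.1.2, hok.2⟩
  obtain ⟨hp, hr, hcross, hok'⟩ := hparts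
  have hpatT : ∀ q ∈ T', pvPat q.1 = true := pvTblOK_pat hok'
  have hneT : pvNE T' := pvTblOK_ne hok'
  have hne1 : pvNE [(p, r)] := by
    intro pr hpr
    simp only [List.mem_singleton] at hpr
    subst hpr
    exact pvPat_ne hp
  have hneF : pvNE ((p, r) :: T') := by
    intro pr hpr
    rcases List.mem_cons.mp hpr with h | h
    · subst h; exact pvPat_ne hp
    · exact hneT pr h
  intro n
  induction n with
  | zero =>
    intro s hs
    have : s = [] := List.eq_nil_of_length_eq_zero (Nat.le_zero.mp hs)
    subst this
    rfl
  | succ m ih =>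
    intro s hs
    cases s with
    | nil => rfl
    | cons c t =>
      have ht : t.length ≤ m := by simpa using hs
      by_cases hpre : p.isPrefixOf (c :: t) = true
      · -- head pattern fires: inner scan emits r, which is inert for T'
        have hdrop : (List.drop p.length (c :: t)).length ≤ m := by
          have : 1 ≤ p.length := by
            have := pvPat_ne hp
            cases p with | nil => exact absurd rfl this | cons _ _ => simp
          simp only [List.length_drop, List.length_cons]
          omega
        have h1 : pvScan [(p, r)] (c :: t) =
            r ++ pvScan [(p, r)] (List.drop p.length (c :: t)) := by
          rw [pvScan_cons _ hne1]
          simp [List.find?, hpre]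
        have h2 : pvScan ((p, r) :: T') (c :: t) =
            r ++ pvScan ((p, r) :: T') (List.drop p.length (c :: t)) := by
          rw [pvScan_cons _ hneF]
          simp [List.find?, hpre]
        rw [h1, h2, pvScan_brFree_append T' hpatT r _ hr, ih _ hdrop]
      · -- head pattern does not fire: T' sees the same matches on both sides
        have h1 : pvScan [(p, r)] (c :: t) = c :: pvScan [(p, r)] t := by
          rw [pvScan_cons _ hne1]
          simp [List.find?, hpre]
        have hcongr : ∀ q ∈ T', (q.1.isPrefixOf (c :: pvScan [(p, r)] t)) =
            (q.1.isPrefixOf (c :: t)) := by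
          intro q hq
          obtain ⟨q', hq', hbrq⟩ := pvPat_shape (hpatT q hq)
          rw [hq']
          by_cases hc : ('[' : Char) = c
          · subst hc
            simp only [List.isPrefixOf, beq_self_eq_true, Bool.true_and]
            have := hcross q hq
            rw [hq'] at this
            exact (pvM p r hp t.length t q' (le_refl _) hbrq this).1
          · have : (('[' : Char) == c) = false := by simp [hc]
            simp [List.isPrefixOf, this]
        have hfind : T'.find? (fun pr => pr.1.isPrefixOf (c :: pvScan [(p, r)] t)) =
            T'.find? (fun pr => pr.1.isPrefixOf (c :: t)) :=
          pvFind?_congr _ _ _ fun q hq => hcongr q hq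
        have h2 : pvScan ((p, r) :: T') (c :: t) =
            match T'.find? (fun pr => pr.1.isPrefixOf (c :: t)) with
            | some (q, rq) => rq ++ pvScan ((p, r) :: T') (List.drop q.length (c :: t))
            | none => c :: pvScan ((p, r) :: T') t := by
          rw [pvScan_cons _ hneF]
          simp [List.find?, hpre]
        have h3 : pvScan T' (c :: pvScan [(p, r)] t) =
            match T'.find? (fun pr => pr.1.isPrefixOf (c :: t)) with
            | some (q, rq) => rq ++ pvScan T' (List.drop q.length (c :: pvScan [(p, r)] t))
            | none => c :: pvScan T' (pvScan [(p, r)] t) := by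
          rw [pvScan_cons _ hneT, hfind]
        rw [h1, h3, h2]
        cases hfq : T'.find? (fun pr => pr.1.isPrefixOf (c :: t)) with
        | none =>
          dsimp only
          rw [ih t ht]
        | some qrq =>
          obtain ⟨q, rq⟩ := qrq
          dsimp only
          have hqmem : (q, rq) ∈ T' := List.mem_of_find?_eq_some hfq
          have hqpre : q.isPrefixOf (c :: t) = true := by
            have := List.find?_some hfq
            exact this
          obtain ⟨q', hq', hbrq⟩ := pvPat_shape (hpatT (q, rq) hqmem)
          dsimp only at hq'
          rw [hq'] at hqpre
          have hqpref := List.isPrefixOf_iff_prefix.mp hqpre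
          rcases List.cons_prefix_cons.mp hqpref with ⟨hc, hq'pre⟩
          have hgq : pvGoodP q' r = true := by
            have := hcross (q, rq) hqmem
            rw [hq'] at this
            exact this
          have hdropM := (pvM p r hp t.length t q' (le_refl _) hbrq hgq).2 hq'pre
          have hdq : (List.drop q'.length t).length ≤ m := by
            simp only [List.length_drop]
            omega
          rw [hq']
          simp only [List.length_cons, List.drop_succ_cons]
          rw [hdropM, ih _ hdq]

def pvChain (T : List (List Char × List Char)) (l : List Char) : List Char :=
  T.foldl (fun s pr => PySem.Chars.replace s pr.1 pr.2) l

theorem pvScan_empty_tbl : ∀ l, pvScan ([] : List (List Char × List Char)) l = l := by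
  intro l
  induction l with
  | nil => rfl
  | cons c t ih =>
    rw [pvScan_cons _ (by intro pr hpr; simp at hpr)]
    simp [List.find?, ih]

theorem pvChain_eq_scan : ∀ T, pvTblOK T = true → ∀ l, pvChain T l = pvScan T l := by
  intro T
  induction T with
  | nil => intro _ l; exact (pvScan_empty_tbl l).symm
  | cons hd T' ih =>
    obtain ⟨p, r⟩ := hd
    intro hok l
    have hok' : pvTblOK T' = true := by
      simp only [pvTblOK, Bool.and_eq_true] at hok; exact hok.2
    have hp : pvPat p = true := by
      simp only [pvTblOK, Bool.and_eq_true] at hok; exact hok.1.1.1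
    show pvChain T' (PySem.Chars.replace l p r) = _
    rw [ih hok', pvReplace_eq_scan l p r (pvPat_ne hp),
      pvFusion p r T' hok l.length l (le_refl _)]

theorem pvTblOK_pairs : pvTblOK pvPairs = true := by decide

theorem pvA_toList (d : String) :
    (answer_re_touch d).toList = pvChain pvPairs d.toList := by
  have h14 : PySem.List.pyRange 0 ((14 : Nat) : Int) 1 =
      [0, 1, 2, 3, 4, 5, 6, 7, 8, 9, 10, 11, 12, 13] := by decide
  have h4 : PySem.List.pyRange 0 ((4 : Nat) : Int) 1 = [0, 1, 2, 3] := by decide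
  simp only [answer_re_touch, List.length_cons, List.length_nil, Nat.cast_ofNat, h14, h4,
    Nat.cast_zero, Nat.cast_one, List.foldl_cons,
    List.foldl_nil, pvChain, pvPairs, tag_list, tag2replace, List.zip, List.zipWith,
    List.map, PySem.Str.toList_replace]
  norm_num [PySem.List.pyGet?, PySem.List.pyIdx?]
  rfl

-- ===== VERDICT (by name: the statement is the Claim_ definition above) =====
theorem answer_re_touch_spec : Claim_equal_answer_re_touch := by
  intro document _
  show answer_re_touch document = answer_re_touch_alt document
  apply String.toList_inj.mp
  rw [pvA_toList, pvChain_eq_scan pvPairs pvTblOK_pairs]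
  show pvScan pvPairs document.toList = (String.ofList (pvScanGo pvPairs document.toList.length document.toList)).toList
  rw [String.toList_ofList]
  rfl
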